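-- pv_equiv track=rewrite | github.com/NeuberJone/ProjetoVision | legacy/jarvis_v1/Jarvis2.py | decide_effective_fields
-- ===== SOURCE A (Python) =====
-- FIELD_ORDER = ["Name","Number","ShortSleeve","LongSleeve","Short","Pants","Tanktop","Vest","Nickname","BloodType"]
--
-- MANDATORY_FIELDS = {"Name","Number"}
--
-- def normalize_str(x):
--     if x is None:
--         return ""
--     return str(x).replace("\r","").replace("\n"," ").strip()
--
-- def decide_effective_fields(orders):
--     present = set()
--     for entry in orders:
--         for key in FIELD_ORDER:
--             if key in MANDATORY_FIELDS:
--                 continue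
--             if normalize_str(entry.get(key,"")) != "":
--                 present.add(key)
--     return [k for k in FIELD_ORDER if (k in MANDATORY_FIELDS) or (k in present)]
-- ===== SOURCE B (Python) =====
-- FIELD_ORDER = ["Name","Number","ShortSleeve","LongSleeve","Short","Pants","Tanktop","Vest","Nickname","BloodType"]
--
-- MANDATORY_FIELDS = {"Name","Number"}
--
-- def normalize_str(x):
--     if x is None:
--         return ""
--     return str(x).replace("\r","").replace("\n"," ").strip()
--
-- def decide_effective_fields(orders):
--     def used(key, rest):
--         if not rest:
--             return False
--         if normalize_str(rest[0].get(key, "")) != "":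
--             return True
--         return used(key, rest[1:])
--
--     def build(keys):
--         if not keys:
--             return []
--         k, rest = keys[0], keys[1:]
--         tail = build(rest)
--         if k in MANDATORY_FIELDS or used(k, orders):
--             return [k] + tail
--         return tail
--
--     return build(FIELD_ORDER)
-- ===== Notes on version B (the rewrite author's own statement) =====
-- stated objective: alternative
-- what changed: Replaces the entry-outer nested fold that mutates a 'present' accumulator set with a recursive field-driven decomposition: a structural recursion over FIELD_ORDER builds the result list directly, deciding each key with a short-circuiting recursive scan over the entries, with no accumulator set at all.
import Mathlib
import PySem

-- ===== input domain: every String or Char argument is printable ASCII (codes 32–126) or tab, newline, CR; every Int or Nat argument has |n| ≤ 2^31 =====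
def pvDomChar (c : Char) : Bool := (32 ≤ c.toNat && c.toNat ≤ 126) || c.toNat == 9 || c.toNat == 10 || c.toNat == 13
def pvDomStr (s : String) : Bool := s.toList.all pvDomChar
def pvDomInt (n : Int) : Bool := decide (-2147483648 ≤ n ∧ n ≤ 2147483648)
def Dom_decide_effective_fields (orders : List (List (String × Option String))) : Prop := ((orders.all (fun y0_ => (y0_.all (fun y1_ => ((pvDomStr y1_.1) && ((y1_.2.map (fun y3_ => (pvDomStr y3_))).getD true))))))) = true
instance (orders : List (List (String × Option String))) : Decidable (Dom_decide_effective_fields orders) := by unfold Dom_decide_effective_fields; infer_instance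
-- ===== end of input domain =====

-- B replaces A's entry-outer nested fold with a mutated 'present' set by a recursive
-- field-driven decomposition (alternative; same shared helper normalize_str and module constants).

-- ===== shared module constants and helper (identical in Source A and Source B) =====
def FIELD_ORDER : List String :=
  ["Name","Number","ShortSleeve","LongSleeve","Short","Pants","Tanktop","Vest","Nickname","BloodType"]

def MANDATORY_FIELDS : PySem.Set String := PySem.Set.ofList ["Name","Number"]

-- normalize_str(x): x is the Option String value (None → ""), after entry.get(key,"")
def normalize_str (x : Option String) : String :=
  match x with
  | none => ""
  | some s => PySem.Str.strip (PySem.Str.replace (PySem.Str.replace s "\r" "") "\n" " ")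

-- ===== PORT A =====
-- normalize_str(entry.get(key,"")) != ""
def fieldHit (entry : List (String × Option String)) (key : String) : Bool :=
  normalize_str ((PySem.Dict.mk entry).getD key (some "")) != ""

def decide_effective_fields (orders : List (List (String × Option String))) : List String :=
  let present : PySem.Set String :=
    orders.foldl (fun present entry =>
      FIELD_ORDER.foldl (fun present key =>
        if MANDATORY_FIELDS.contains key then present
        else if fieldHit entry key then PySem.Set.add present key
        else present) present) PySem.Set.empty
  FIELD_ORDER.filter (fun k => MANDATORY_FIELDS.contains k || present.contains k)

-- ===== PORT B =====
-- used(key, rest): short-circuiting recursive scan over the entries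
def dfUsed (key : String) : List (List (String × Option String)) → Bool
  | [] => false
  | e :: rest =>
      if normalize_str ((PySem.Dict.mk e).getD key (some "")) != "" then true
      else dfUsed key rest

-- build(keys): structural recursion over the field list, consing kept keys onto the tail
def dfBuild (orders : List (List (String × Option String))) : List String → List String
  | [] => []
  | k :: rest =>
      let tail := dfBuild orders rest
      if MANDATORY_FIELDS.contains k || dfUsed k orders then k :: tail else tail

def decide_effective_fields_alt (orders : List (List (String × Option String))) : List String :=
  dfBuild orders FIELD_ORDER

-- ===== PRECONDITION & SPEC =====
def Spec_decide_effective_fields (orders : List (List (String × Option String))) (out : List String) : Prop := out = decide_effective_fields_alt orders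
instance (orders : List (List (String × Option String))) (out : List String) : Decidable (Spec_decide_effective_fields orders out) := by unfold Spec_decide_effective_fields; infer_instance

-- ===== CLAIM (what is proved, stated in full; the proofs are below) =====
def Claim_equal_decide_effective_fields : Prop := ∀ (orders : List (List (String × Option String))), Dom_decide_effective_fields orders → Spec_decide_effective_fields orders (decide_effective_fields orders)

-- ===== LEMMAS AND PROOFS =====

-- B's entry scan is the any-predicate over entries
lemma dfUsed_eq_any (key : String) (orders : List (List (String × Option String))) :
    dfUsed key orders = orders.any (fun e => fieldHit e key) := by
  induction orders with
  | nil => rfl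
  | cons e rest ih =>
    simp only [dfUsed, List.any_cons, fieldHit]
    split_ifs with h
    · simp [h]
    · simp only [Bool.not_eq_true] at h
      simp [h, ih, fieldHit]

-- B's structural recursion over the field list is a filter
lemma dfBuild_eq_filter (orders : List (List (String × Option String))) (ks : List String) :
    dfBuild orders ks = ks.filter (fun k => MANDATORY_FIELDS.contains k || dfUsed k orders) := by
  induction ks with
  | nil => rfl
  | cons k rest ih =>
    simp only [dfBuild, List.filter_cons]
    split_ifs with h
    · simp [ih]
    · exact ih

-- membership in A's inner per-entry fold over a key list
lemma mem_innerFold (entry : List (String × Option String)) (ks : List String)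
    (s : PySem.Set String) (k : String) :
    k ∈ ks.foldl (fun present key =>
        if MANDATORY_FIELDS.contains key then present
        else if fieldHit entry key then PySem.Set.add present key
        else present) s
    ↔ k ∈ s ∨ (k ∈ ks ∧ k ∉ MANDATORY_FIELDS ∧ fieldHit entry k = true) := by
  induction ks generalizing s with
  | nil => simp
  | cons key rest ih =>
    simp only [List.foldl_cons]
    split_ifs with h1 h2
    · rw [ih]; simp only [List.mem_cons]
      constructor
      · rintro (hs | ⟨hr, hnm, hh⟩)
        · exact Or.inl hs
        · exact Or.inr ⟨Or.inr hr, hnm, hh⟩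
      · rintro (hs | ⟨(rfl | hr), hnm, hh⟩)
        · exact Or.inl hs
        · exact absurd ((PySem.Set.contains_iff _ _).mp h1) hnm
        · exact Or.inr ⟨hr, hnm, hh⟩
    · rw [ih]; simp only [PySem.Set.mem_add, List.mem_cons]
      constructor
      · rintro ((hs | rfl) | ⟨hr, hnm, hh⟩)
        · exact Or.inl hs
        · exact Or.inr ⟨Or.inl rfl, fun hmem => h1 ((PySem.Set.contains_iff _ _).mpr hmem), h2⟩
        · exact Or.inr ⟨Or.inr hr, hnm, hh⟩
      · rintro (hs | ⟨(rfl | hr), hnm, hh⟩)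
        · exact Or.inl (Or.inl hs)
        · exact Or.inl (Or.inr rfl)
        · exact Or.inr ⟨hr, hnm, hh⟩
    · rw [ih]; simp only [List.mem_cons]
      constructor
      · rintro (hs | ⟨hr, hnm, hh⟩)
        · exact Or.inl hs
        · exact Or.inr ⟨Or.inr hr, hnm, hh⟩
      · rintro (hs | ⟨(rfl | hr), hnm, hh⟩)
        · exact Or.inl hs
        · exact absurd hh h2
        · exact Or.inr ⟨hr, hnm, hh⟩

-- membership in A's outer fold over entries
lemma mem_outerFold (orders : List (List (String × Option String)))
    (s : PySem.Set String) (k : String) :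
    k ∈ orders.foldl (fun present entry =>
        FIELD_ORDER.foldl (fun present key =>
          if MANDATORY_FIELDS.contains key then present
          else if fieldHit entry key then PySem.Set.add present key
          else present) present) s
    ↔ k ∈ s ∨ ∃ entry ∈ orders,
        k ∈ FIELD_ORDER ∧ k ∉ MANDATORY_FIELDS ∧ fieldHit entry k = true := by
  induction orders generalizing s with
  | nil => simp
  | cons e rest ih =>
    simp only [List.foldl_cons]
    rw [ih, mem_innerFold, List.exists_mem_cons_iff]
    tauto

-- ===== VERDICT (by name: the statement is the Claim_ definition above) =====
theorem decide_effective_fields_spec : Claim_equal_decide_effective_fields := by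
  intro orders _
  unfold Spec_decide_effective_fields decide_effective_fields decide_effective_fields_alt
  rw [dfBuild_eq_filter]
  dsimp only
  apply List.filter_congr
  intro k hk
  by_cases hm : k ∈ MANDATORY_FIELDS
  · have hct : MANDATORY_FIELDS.contains k = true := (PySem.Set.contains_iff _ _).mpr hm
    rw [hct, Bool.true_or, Bool.true_or]
  · have hcf : MANDATORY_FIELDS.contains k = false :=
      Bool.eq_false_iff.mpr (fun h => hm ((PySem.Set.contains_iff _ _).mp h))
    rw [hcf, Bool.false_or, Bool.false_or, Bool.eq_iff_iff,
      PySem.Set.contains_iff, mem_outerFold, dfUsed_eq_any, List.any_eq_true]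
    constructor
    · rintro (hs | ⟨e, he, _, _, hh⟩)
      · exact absurd hs (by simp [PySem.Set.empty])
      · exact ⟨e, he, hh⟩
    · rintro ⟨e, he, hh⟩
      exact Or.inr ⟨e, he, hk, hm, hh⟩
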